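-- pv_equiv track=rewrite | github.com/aarond10/agl_to_nem12 | agl_to_nem12.py | determine_day_quality
-- ===== SOURCE A (Python) =====
-- DEFAULT_QUALITY = 'E' # Default if AGL flag is unknown or missing
--
-- def determine_day_quality(interval_qualities):
--     present_qualities = {q for q in interval_qualities if q}
--     if not present_qualities: return DEFAULT_QUALITY
--     if 'N' in present_qualities: return 'N'
--     if 'S' in present_qualities: return 'S'
--     if 'E' in present_qualities: return 'E'
--     if 'F' in present_qualities: return 'F'
--     if 'A' in present_qualities: return 'A'
--     return DEFAULT_QUALITY
-- ===== SOURCE B (Python) =====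
-- DEFAULT_QUALITY = 'E'
--
-- PRIORITY = {'N': 0, 'S': 1, 'E': 2, 'F': 3, 'A': 4}
--
-- def determine_day_quality(interval_qualities):
--     best = None
--     for q in interval_qualities:
--         r = PRIORITY.get(q)
--         if r is not None and (best is None or r < best[0]):
--             best = (r, q)
--     return best[1] if best is not None else DEFAULT_QUALITY
-- ===== Notes on version B (the rewrite author's own statement) =====
-- stated objective: alternative
-- what changed: Replaces A's set comprehension plus fixed if-chain of membership tests with a table-driven single pass keeping a running minimum priority rank.
import Mathlib
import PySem

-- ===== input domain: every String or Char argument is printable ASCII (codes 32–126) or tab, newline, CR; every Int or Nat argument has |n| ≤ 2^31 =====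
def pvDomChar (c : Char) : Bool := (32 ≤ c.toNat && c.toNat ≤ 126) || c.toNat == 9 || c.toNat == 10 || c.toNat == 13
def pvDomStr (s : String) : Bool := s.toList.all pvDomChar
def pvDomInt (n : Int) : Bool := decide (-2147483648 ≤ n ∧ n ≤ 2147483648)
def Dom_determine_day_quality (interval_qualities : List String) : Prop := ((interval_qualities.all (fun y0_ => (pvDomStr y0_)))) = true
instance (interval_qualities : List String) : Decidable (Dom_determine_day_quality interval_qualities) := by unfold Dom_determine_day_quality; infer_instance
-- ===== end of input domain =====

-- B replaces A's set comprehension + fixed if-chain with a table-driven single pass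
-- keeping a running minimum priority rank (objective: alternative decomposition).


-- ===== PORT A =====
def determine_day_quality (interval_qualities : List String) : String :=
  let present : PySem.Set String :=
    PySem.Set.ofList (interval_qualities.filter (fun q => !(q == "")))
  if present = [] then "E"
  else if PySem.Set.contains present "N" then "N"
  else if PySem.Set.contains present "S" then "S"
  else if PySem.Set.contains present "E" then "E"
  else if PySem.Set.contains present "F" then "F"
  else if PySem.Set.contains present "A" then "A"
  else "E"

-- ===== PORT B =====
def pvPriority : PySem.Dict String Int :=
  PySem.Dict.ofList [("N", 0), ("S", 1), ("E", 2), ("F", 3), ("A", 4)]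

def pvStep (best : Option (Int × String)) (q : String) : Option (Int × String) :=
  match pvPriority.get? q with
  | none => best
  | some r =>
    match best with
    | none => some (r, q)
    | some (rb, _) => if r < rb then some (r, q) else best

def determine_day_quality_alt (interval_qualities : List String) : String :=
  match interval_qualities.foldl pvStep none with
  | some (_, qb) => qb
  | none => "E"

-- ===== PRECONDITION & SPEC =====
def Spec_determine_day_quality (interval_qualities : List String) (out : String) : Prop := out = determine_day_quality_alt interval_qualities
instance (interval_qualities : List String) (out : String) : Decidable (Spec_determine_day_quality interval_qualities out) := by unfold Spec_determine_day_quality; infer_instance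

-- ===== CLAIM (what is proved, stated in full; the proofs are below) =====
def Claim_equal_determine_day_quality : Prop := ∀ (interval_qualities : List String), Dom_determine_day_quality interval_qualities → Spec_determine_day_quality interval_qualities (determine_day_quality interval_qualities)

-- ===== LEMMAS AND PROOFS =====

/-- The canonical answer: the highest-priority flag present in the list, as a
ranked pair (what B's fold computes). -/
def canonOpt (l : List String) : Option (Int × String) :=
  if "N" ∈ l then some (0, "N")
  else if "S" ∈ l then some (1, "S")
  else if "E" ∈ l then some (2, "E")
  else if "F" ∈ l then some (3, "F")
  else if "A" ∈ l then some (4, "A")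
  else none

def canon (l : List String) : String :=
  match canonOpt l with
  | some (_, q) => q
  | none => "E"

def pvMerge : Option (Int × String) → Option (Int × String) → Option (Int × String)
  | none, c => c
  | b, none => b
  | some (rb, qb), some (rc, qc) => if rc < rb then some (rc, qc) else some (rb, qb)

lemma pvMerge_none_right (b : Option (Int × String)) : pvMerge b none = b := by
  cases b <;> rfl

lemma pvStep_eq_merge (b : Option (Int × String)) (q : String) :
    pvStep b q = pvMerge b (pvStep none q) := by
  unfold pvStep
  cases h : pvPriority.get? q with
  | none => simp [pvMerge_none_right]
  | some r =>
    cases b with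
    | none => rfl
    | some p => rcases p with ⟨rb, qb⟩; simp [pvMerge]

lemma pvMerge_assoc (a b c : Option (Int × String)) :
    pvMerge (pvMerge a b) c = pvMerge a (pvMerge b c) := by
  rcases a with _ | ⟨ra, qa⟩
  · rfl
  rcases b with _ | ⟨rb, qb⟩
  · simp only [pvMerge_none_right]
    cases c <;> rfl
  rcases c with _ | ⟨rc, qc⟩
  · simp only [pvMerge_none_right]
  by_cases h1 : rb < ra <;> by_cases h2 : rc < rb <;> by_cases h3 : rc < ra <;>
    simp [pvMerge, h1, h2, h3] <;> omega

lemma foldl_pvStep_merge (l : List String) (b : Option (Int × String)) :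
    l.foldl pvStep b = pvMerge b (l.foldl pvStep none) := by
  induction l generalizing b with
  | nil => simp [pvMerge_none_right]
  | cons q l ih =>
    simp only [List.foldl_cons]
    rw [ih (pvStep b q), ih (pvStep none q), pvStep_eq_merge b q, pvMerge_assoc]

lemma foldl_pvStep_eq_canonOpt (l : List String) :
    l.foldl pvStep none = canonOpt l := by
  induction l with
  | nil => rfl
  | cons q l ih =>
    simp only [List.foldl_cons]
    rw [foldl_pvStep_merge, ih]
    show pvMerge (pvStep none q) (canonOpt l) = canonOpt (q :: l)
    by_cases hN : q = "N"
    · subst hN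
      rw [show pvStep none "N" = some (0, "N") from by decide]
      unfold canonOpt
      simp only [List.mem_cons]
      split_ifs <;> simp_all <;> decide
    · by_cases hS : q = "S"
      · subst hS
        rw [show pvStep none "S" = some (1, "S") from by decide]
        unfold canonOpt
        simp only [List.mem_cons]
        split_ifs <;> simp_all <;> decide
      · by_cases hE : q = "E"
        · subst hE
          rw [show pvStep none "E" = some (2, "E") from by decide]
          unfold canonOpt
          simp only [List.mem_cons]
          split_ifs <;> simp_all <;> decide
        · by_cases hF : q = "F"
          · subst hF
            rw [show pvStep none "F" = some (3, "F") from by decide]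
            unfold canonOpt
            simp only [List.mem_cons]
            split_ifs <;> simp_all <;> decide
          · by_cases hA : q = "A"
            · subst hA
              rw [show pvStep none "A" = some (4, "A") from by decide]
              unfold canonOpt
              simp only [List.mem_cons]
              split_ifs <;> simp_all <;> decide
            · have hget : pvPriority.get? q = none := by
                rw [show pvPriority = PySem.Dict.mk [("N", 0), ("S", 1), ("E", 2), ("F", 3), ("A", 4)] from by decide]
                simp [Ne.symm hN, Ne.symm hS, Ne.symm hE, Ne.symm hF, Ne.symm hA, PySem.Dict.get?]
              rw [show pvStep none q = none from by simp [pvStep, hget]]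
              show pvMerge none (canonOpt l) = canonOpt (q :: l)
              unfold canonOpt
              simp [pvMerge, List.mem_cons, Ne.symm hN, Ne.symm hS, Ne.symm hE, Ne.symm hF, Ne.symm hA]

lemma alt_eq_canon (l : List String) : determine_day_quality_alt l = canon l := by
  unfold determine_day_quality_alt canon
  rw [foldl_pvStep_eq_canonOpt]

lemma mem_present (l : List String) (x : String) (hx : x ≠ "") :
    x ∈ PySem.Set.ofList (l.filter (fun q => !(q == ""))) ↔ x ∈ l := by
  rw [PySem.Set.mem_ofList, List.mem_filter]
  simp [hx]

lemma a_eq_canon (l : List String) : determine_day_quality l = canon l := by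
  unfold determine_day_quality canon canonOpt
  simp only []
  by_cases hp : PySem.Set.ofList (l.filter (fun q => !(q == ""))) = ([] : List String)
  · have hno : ∀ x : String, x ≠ "" → x ∉ l := by
      intro x hx hmem
      have := (mem_present l x hx).mpr hmem
      rw [hp] at this
      exact (List.not_mem_nil this).elim
    rw [if_pos hp]
    rw [if_neg (hno "N" (by decide)), if_neg (hno "S" (by decide)), if_neg (hno "E" (by decide)),
        if_neg (hno "F" (by decide)), if_neg (hno "A" (by decide))]
  · rw [if_neg hp]
    have hc : ∀ x : String, x ≠ "" →
        (PySem.Set.contains (PySem.Set.ofList (l.filter (fun q => !(q == "")))) x = true ↔ x ∈ l) := by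
      intro x hx
      rw [PySem.Set.contains_iff, mem_present l x hx]
    by_cases hn : "N" ∈ l
    · rw [if_pos ((hc "N" (by decide)).mpr hn), if_pos hn]
    · rw [if_neg (fun h => hn ((hc "N" (by decide)).mp h)), if_neg hn]
      by_cases hs : "S" ∈ l
      · rw [if_pos ((hc "S" (by decide)).mpr hs), if_pos hs]
      · rw [if_neg (fun h => hs ((hc "S" (by decide)).mp h)), if_neg hs]
        by_cases he : "E" ∈ l
        · rw [if_pos ((hc "E" (by decide)).mpr he), if_pos he]
        · rw [if_neg (fun h => he ((hc "E" (by decide)).mp h)), if_neg he]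
          by_cases hf : "F" ∈ l
          · rw [if_pos ((hc "F" (by decide)).mpr hf), if_pos hf]
          · rw [if_neg (fun h => hf ((hc "F" (by decide)).mp h)), if_neg hf]
            by_cases ha : "A" ∈ l
            · rw [if_pos ((hc "A" (by decide)).mpr ha), if_pos ha]
            · rw [if_neg (fun h => ha ((hc "A" (by decide)).mp h)), if_neg ha]

-- ===== VERDICT (by name: the statement is the Claim_ definition above) =====
theorem determine_day_quality_spec : Claim_equal_determine_day_quality := by
  intro l _
  unfold Spec_determine_day_quality
  rw [a_eq_canon, alt_eq_canon]
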